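-- pv_equiv track=rewrite | github.com/alexandraback/datacollection | solutions_5644738749267968_0/Python/gzroger/q4.py | ioptCalc
-- ===== SOURCE A (Python) =====
-- def ioptCalc(wN, rgwK):
--     iopt = -1
--     dwOpt = 0
--     imin = 0
--     #could use binary search
--     for i, wK in enumerate(rgwK):
--         if wK > wN:
--             if iopt == -1 or dwOpt > wK - wN:
--                 iopt = i
--                 dwOpt = wK - wN
--         if wK < rgwK[imin]:
--             imin = i
--     return iopt if iopt > -1 else imin
-- ===== SOURCE B (Python) =====
-- def ioptCalc(wN, rgwK):
--     # Sort the values ascending; the first sorted value exceeding wN is the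
--     # smallest value above the threshold, and its first position in rgwK is the
--     # earliest index carrying it.  If no value exceeds wN, the sorted head is
--     # the global minimum; return its first position (0 for an empty list).
--     srt = sorted(rgwK)
--     for v in srt:
--         if v > wN:
--             return rgwK.index(v)
--     return rgwK.index(srt[0]) if srt else 0
-- ===== Notes on version B (the rewrite author's own statement) =====
-- stated objective: alternative
-- what changed: Replaced A's single fused tracking loop (iopt/dwOpt/imin maintained together) by sort-then-scan: sort the values, take the first sorted value exceeding wN (the minimum above threshold) and return its first position via rgwK.index; if none exceeds, return the first position of the sorted head (the global minimum), 0 for empty input.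
import Mathlib
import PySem

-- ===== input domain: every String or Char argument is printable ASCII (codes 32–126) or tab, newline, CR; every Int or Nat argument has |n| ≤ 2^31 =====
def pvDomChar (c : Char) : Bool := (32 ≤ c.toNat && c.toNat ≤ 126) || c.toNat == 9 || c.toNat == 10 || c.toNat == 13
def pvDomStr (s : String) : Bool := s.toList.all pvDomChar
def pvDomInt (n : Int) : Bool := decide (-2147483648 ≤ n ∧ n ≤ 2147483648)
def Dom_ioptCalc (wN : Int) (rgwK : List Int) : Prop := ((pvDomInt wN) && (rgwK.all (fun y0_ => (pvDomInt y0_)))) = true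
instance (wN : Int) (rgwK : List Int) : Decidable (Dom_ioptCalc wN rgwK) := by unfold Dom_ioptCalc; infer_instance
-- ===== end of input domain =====

-- B replaces A's single fused tracking loop by sort-then-scan: sort the values, pick the first
-- sorted value exceeding wN and return its first index, else the first index of the sorted head
-- (alternative algorithm, O(n log n) vs A's O(n)).

-- ===== PORT A =====
-- the for-loop of A, structural recursion over enumerate(rgwK) with state (iopt, dwOpt, imin)
def ioptCalcLoop (wN : Int) (rgwK : List Int) : List (Int × Int) → Int × Int × Int → Int × Int × Int
  | [], st => st
  | (i, wK) :: rest, (iopt, dwOpt, imin) =>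
    let st1 : Int × Int :=
      if wK > wN then
        (if iopt = -1 ∨ dwOpt > wK - wN then (i, wK - wN) else (iopt, dwOpt))
      else (iopt, dwOpt)
    -- rgwK[imin]: imin is always a valid index while A's loop runs, so the getD default is never taken
    let imin' := if wK < (PySem.List.pyGet? rgwK imin).getD 0 then i else imin
    ioptCalcLoop wN rgwK rest (st1.1, st1.2, imin')

def ioptCalc (wN : Int) (rgwK : List Int) : Int :=
  let st := ioptCalcLoop wN rgwK (PySem.List.enumerate rgwK) (-1, 0, 0)
  if st.1 > -1 then st.1 else st.2.2

-- ===== PORT B =====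
-- Source B: srt = sorted(rgwK); scan srt for the first v > wN, return rgwK.index(v);
-- else rgwK.index(srt[0]) if srt else 0.  rgwK.index never raises here (the looked-up
-- value is a member), so the getD default is never taken.
def ioptCalc_alt (wN : Int) (rgwK : List Int) : Int :=
  let srt := PySem.List.sorted rgwK (fun v => v) false
  match srt.find? (fun v => decide (v > wN)) with
  | some v => (((PySem.List.index? rgwK v).getD 0 : Nat) : Int)
  | none =>
    match srt with
    | [] => 0
    | m :: _ => (((PySem.List.index? rgwK m).getD 0 : Nat) : Int)

-- ===== PRECONDITION & SPEC =====
def Spec_ioptCalc (wN : Int) (rgwK : List Int) (out : Int) : Prop := out = ioptCalc_alt wN rgwK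
instance (wN : Int) (rgwK : List Int) (out : Int) : Decidable (Spec_ioptCalc wN rgwK out) := by unfold Spec_ioptCalc; infer_instance

-- ===== CLAIM (what is proved, stated in full; the proofs are below) =====
def Claim_equal_ioptCalc : Prop := ∀ (wN : Int) (rgwK : List Int), Dom_ioptCalc wN rgwK → Spec_ioptCalc wN rgwK (ioptCalc wN rgwK)

-- ===== LEMMAS AND PROOFS =====

-- proof-side decomposition of A's loop: the (iopt, dwOpt) fold and the imin fold, taken separately
def optFold (wN : Int) (l : List (Int × Int)) (s : Int × Int) : Int × Int :=
  l.foldl (fun a x =>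
    if x.2 > wN then
      (if a.1 = -1 ∨ a.2 > x.2 - wN then (x.1, x.2 - wN) else a)
    else a) s

def minFold (rgwK : List Int) (l : List (Int × Int)) (imin : Int) : Int :=
  l.foldl (fun a x => if x.2 < (PySem.List.pyGet? rgwK a).getD 0 then x.1 else a) imin

def minStep : Int × Int → Int × Int → Int × Int :=
  fun a x => if x.2 < a.2 then x else a

theorem loop_split (wN : Int) (rgwK : List Int) (l : List (Int × Int)) :
    ∀ (iopt dwOpt imin : Int),
      ioptCalcLoop wN rgwK l (iopt, dwOpt, imin) =
        ((optFold wN l (iopt, dwOpt)).1, (optFold wN l (iopt, dwOpt)).2,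
          minFold rgwK l imin) := by
  induction l with
  | nil => intro iopt dwOpt imin; rfl
  | cons x t ih =>
    intro iopt dwOpt imin
    obtain ⟨i, wK⟩ := x
    simp only [ioptCalcLoop, optFold, minFold, List.foldl_cons]
    exact ih _ _ _

-- the some-state optFold is a running min over the filtered list
theorem optFold_some (wN : Int) (l : List (Int × Int)) :
    ∀ (j w : Int), 0 ≤ j → (∀ p ∈ l, 0 ≤ p.1) →
      optFold wN l (j, w - wN) =
        (((l.filter (fun p => decide (p.2 > wN))).foldl minStep (j, w)).1,
          ((l.filter (fun p => decide (p.2 > wN))).foldl minStep (j, w)).2 - wN) := by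
  induction l with
  | nil => intro j w hj hl; rfl
  | cons x t ih =>
    intro j w hj hl
    obtain ⟨i, wK⟩ := x
    have hi : (0 : Int) ≤ i := hl (i, wK) (List.mem_cons_self ..)
    have hl' : ∀ p ∈ t, (0 : Int) ≤ p.1 := fun p hp => hl p (List.mem_cons_of_mem _ hp)
    simp only [optFold, List.foldl_cons, List.filter_cons]
    by_cases h1 : wK > wN
    · by_cases h2 : wK < w
      · have hc : ((j : Int) = -1 ∨ w - wN > wK - wN) := Or.inr (by omega)
        simp only [if_pos h1, if_pos hc, decide_eq_true h1, if_true, List.foldl_cons,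
          minStep, if_pos h2]
        exact ih i wK hi hl'
      · have hc : ¬((j : Int) = -1 ∨ w - wN > wK - wN) := by omega
        simp only [if_pos h1, if_neg hc, decide_eq_true h1, if_true, List.foldl_cons,
          minStep, if_neg h2]
        exact ih j w hj hl'
    · simp only [if_neg h1, decide_eq_false h1, Bool.false_eq_true, if_false]
      exact ih j w hj hl'

-- optFold from the initial (-1, 0) state, matching on the filtered list
theorem optFold_start (wN : Int) (l : List (Int × Int)) (hl : ∀ p ∈ l, 0 ≤ p.1) :
    optFold wN l (-1, 0) =
      (match l.filter (fun p => decide (p.2 > wN)) with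
        | [] => ((-1 : Int), (0 : Int))
        | x :: F => ((F.foldl minStep x).1, (F.foldl minStep x).2 - wN)) := by
  induction l with
  | nil => rfl
  | cons x t ih =>
    obtain ⟨i, wK⟩ := x
    have hi : (0 : Int) ≤ i := hl (i, wK) (List.mem_cons_self ..)
    have hl' : ∀ p ∈ t, (0 : Int) ≤ p.1 := fun p hp => hl p (List.mem_cons_of_mem _ hp)
    by_cases h1 : wK > wN
    · simp only [optFold, List.foldl_cons, List.filter_cons, if_pos h1,
        decide_eq_true h1, if_true]
      simp only [true_or, if_true]
      have := optFold_some wN t i wK hi hl'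
      simp only [optFold] at this
      exact this
    · simp only [optFold, List.foldl_cons, List.filter_cons, if_neg h1,
        decide_eq_false h1, Bool.false_eq_true, if_false]
      simpa [optFold] using ih hl'

-- the running min is ≤ its seed and ≤ every scanned value
theorem minStep_le (l : List (Int × Int)) :
    ∀ m : Int × Int, (l.foldl minStep m).2 ≤ m.2 ∧ ∀ y ∈ l, (l.foldl minStep m).2 ≤ y.2 := by
  induction l with
  | nil => intro m; exact ⟨le_refl _, by simp⟩
  | cons x t ih =>
    intro m
    simp only [List.foldl_cons, minStep]
    by_cases h : x.2 < m.2
    · simp only [if_pos h]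
      obtain ⟨h1, h2⟩ := ih x
      exact ⟨by omega, by
        intro y hy
        rcases List.mem_cons.mp hy with rfl | hy
        · exact h1
        · exact h2 y hy⟩
    · simp only [if_neg h]
      obtain ⟨h1, h2⟩ := ih m
      exact ⟨h1, by
        intro y hy
        rcases List.mem_cons.mp hy with rfl | hy
        · omega
        · exact h2 y hy⟩

-- first-extremal: everything strictly before the running min's position has a larger value
theorem minStep_first (l : List (Int × Int)) :
    ∀ m : Int × Int, ∃ l1 l2, m :: l = l1 ++ (l.foldl minStep m) :: l2 ∧
      ∀ y ∈ l1, (l.foldl minStep m).2 < y.2 := by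
  induction l with
  | nil => intro m; exact ⟨[], [], rfl, by simp⟩
  | cons x t ih =>
    intro m
    simp only [List.foldl_cons, minStep]
    by_cases h : x.2 < m.2
    · simp only [if_pos h]
      obtain ⟨l1, l2, heq, hlt⟩ := ih x
      refine ⟨m :: l1, l2, by rw [List.cons_append, ← heq], ?_⟩
      intro y hy
      rcases List.mem_cons.mp hy with rfl | hy
      · have := (minStep_le t x).1
        omega
      · exact hlt y hy
    · simp only [if_neg h]
      obtain ⟨l1, l2, heq, hlt⟩ := ih m
      cases l1 with
      | nil =>
        simp only [List.nil_append, List.cons.injEq] at heq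
        obtain ⟨h1, h2⟩ := heq
        refine ⟨[], x :: t, ?_, by simp⟩
        rw [List.nil_append, ← h1]
      | cons a l1' =>
        simp only [List.cons_append, List.cons.injEq] at heq
        obtain ⟨rfl, heq2⟩ := heq
        refine ⟨m :: x :: l1', l2, by rw [List.cons_append, List.cons_append, ← heq2], ?_⟩
        intro y hy
        have ha : (t.foldl minStep m).2 < m.2 := hlt m (List.mem_cons_self ..)
        rcases List.mem_cons.mp hy with rfl | hy
        · exact ha
        rcases List.mem_cons.mp hy with rfl | hy
        · omega
        · exact hlt y (List.mem_cons_of_mem _ hy)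

-- A's imin fold over genuine (index, rgwK[index]) pairs is a running argmin
theorem minFold_spec (rgwK : List Int) (l : List (Int × Int)) :
    ∀ (imin vmin : Int),
      PySem.List.pyGet? rgwK imin = some vmin →
      (∀ p ∈ l, PySem.List.pyGet? rgwK p.1 = some p.2) →
      minFold rgwK l imin = (l.foldl minStep (imin, vmin)).1 := by
  induction l with
  | nil => intro imin vmin h1 h2; rfl
  | cons x t ih =>
    intro imin vmin h1 h2
    obtain ⟨i, wK⟩ := x
    have hx : PySem.List.pyGet? rgwK i = some wK := h2 (i, wK) (List.mem_cons_self ..)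
    have h2' : ∀ p ∈ t, PySem.List.pyGet? rgwK p.1 = some p.2 :=
      fun p hp => h2 p (List.mem_cons_of_mem _ hp)
    simp only [minFold, List.foldl_cons, h1, Option.getD_some, minStep]
    by_cases h : wK < vmin
    · simp only [if_pos h]; exact ih i wK hx h2'
    · simp only [if_neg h]; exact ih imin vmin h1 h2'

theorem enumerate_pyGet (rgwK : List Int) :
    ∀ p ∈ PySem.List.enumerate rgwK, PySem.List.pyGet? rgwK p.1 = some p.2 := by
  intro p hp
  rw [PySem.List.mem_enumerate_iff] at hp
  obtain ⟨k, hk, rfl⟩ := hp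
  simp [hk]

theorem enumerate_fst_nonneg (rgwK : List Int) :
    ∀ p ∈ PySem.List.enumerate rgwK, (0 : Int) ≤ p.1 := by
  intro p hp
  rw [PySem.List.mem_enumerate_iff] at hp
  obtain ⟨k, hk, rfl⟩ := hp
  simp

-- the bridge: for a value-predicate p, the running min over the p-filtered enumerate pairs is
-- (first index of v*, v*) where v* is the least value of rgwK satisfying p; in particular its
-- index is exactly rgwK.index(v*)
theorem bridge (rgwK : List Int) (p : Int → Bool) (x : Int × Int) (F' : List (Int × Int))
    (hF : (PySem.List.enumerate rgwK).filter (fun q => p q.2) = x :: F') :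
    p (F'.foldl minStep x).2 = true ∧
    (F'.foldl minStep x).2 ∈ rgwK ∧
    (∀ y ∈ rgwK, p y = true → (F'.foldl minStep x).2 ≤ y) ∧
    ∃ k : Nat, (F'.foldl minStep x).1 = (k : Int) ∧
      PySem.List.index? rgwK (F'.foldl minStep x).2 = some k := by
  set r := F'.foldl minStep x with hr
  obtain ⟨l1, l2, heq, hlt⟩ := minStep_first F' x
  have hrF : r ∈ (PySem.List.enumerate rgwK).filter (fun q => p q.2) := by
    rw [hF, heq]; exact List.mem_append_right _ (List.mem_cons_self ..)
  have hrE : r ∈ PySem.List.enumerate rgwK := List.mem_of_mem_filter hrF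
  have hrp : p r.2 = true := by simpa using List.of_mem_filter hrF
  obtain ⟨k, hk, hrk⟩ := (PySem.List.mem_enumerate_iff rgwK 0 r).mp hrE
  have hr1 : r.1 = (k : Int) := by rw [hrk]; simp
  have hr2 : r.2 = rgwK[k] := by rw [hrk]
  have hmem : r.2 ∈ rgwK := by rw [hr2]; exact List.getElem_mem hk
  refine ⟨hrp, hmem, ?_, k, hr1, ?_⟩
  · -- minimality among values satisfying p
    intro y hy hpy
    obtain ⟨j, hj, hyj⟩ := List.mem_iff_getElem.mp hy
    have hjE : ((j : Int), y) ∈ PySem.List.enumerate rgwK := by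
      rw [PySem.List.mem_enumerate_iff]
      exact ⟨j, hj, by simp [hyj]⟩
    have hjF : ((j : Int), y) ∈ x :: F' := by
      rw [← hF]; exact List.mem_filter.mpr ⟨hjE, by simpa using hpy⟩
    obtain ⟨hle1, hle2⟩ := minStep_le F' x
    rcases List.mem_cons.mp hjF with hx | hF'
    · have hyx : y = x.2 := by rw [← hx]
      rw [← hr] at hle1; omega
    · have h2 := hle2 _ hF'
      rw [← hr] at h2
      exact h2
  · -- r.1 is the FIRST index of r.2: no earlier occurrence of r.2 in rgwK
    have hpw : List.Pairwise (fun a b : Int × Int => a.1 < b.1)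
        ((PySem.List.enumerate rgwK).filter (fun q => p q.2)) :=
      (PySem.List.pairwise_lt_enumerate rgwK 0).filter _
    rw [hF, heq] at hpw
    have hl2 : ∀ y ∈ l2, r.1 < y.1 := by
      have := (List.pairwise_append.mp hpw).2.1
      exact (List.pairwise_cons.mp this).1
    rw [PySem.List.index?_eq_some_iff]
    refine ⟨rgwK.take k, rgwK.drop (k + 1), ?_, by simp [Nat.le_of_lt hk], ?_⟩
    · rw [hr2, List.getElem_cons_drop hk, List.take_append_drop]
    · -- no occurrence of r.2 before index k
      intro hcontra
      rw [List.mem_take_iff_getElem] at hcontra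
      obtain ⟨j, hjm, hjv⟩ := hcontra
      have hjk : j < k := lt_of_lt_of_le hjm (min_le_left ..)
      have hjl : j < rgwK.length := lt_of_lt_of_le hjm (min_le_right ..)
      have hjE : ((j : Int), r.2) ∈ PySem.List.enumerate rgwK := by
        rw [PySem.List.mem_enumerate_iff]
        exact ⟨j, hjl, by simp [hjv]⟩
      have hjF : ((j : Int), r.2) ∈ l1 ++ r :: l2 := by
        rw [← heq, ← hF]
        exact List.mem_filter.mpr ⟨hjE, by simpa using hrp⟩
      rcases List.mem_append.mp hjF with h1 | h2
      · exact absurd (hlt _ h1) (by simp [hr])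
      · rcases List.mem_cons.mp h2 with hx | hl
        · have : (j : Int) = r.1 := congrArg Prod.fst hx
          omega
        · have := hl2 _ hl
          simp only at this
          omega

-- a value of rgwK satisfying p yields a pair in the p-filtered enumerate list
theorem filter_ne_nil_of_mem (rgwK : List Int) (p : Int → Bool) (v : Int)
    (hv : v ∈ rgwK) (hp : p v = true) :
    (PySem.List.enumerate rgwK).filter (fun q => p q.2) ≠ [] := by
  obtain ⟨j, hj, hvj⟩ := List.mem_iff_getElem.mp hv
  intro hnil
  have : ((j : Int), v) ∈ (PySem.List.enumerate rgwK).filter (fun q => p q.2) := by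
    refine List.mem_filter.mpr ⟨?_, by simpa using hp⟩
    rw [PySem.List.mem_enumerate_iff]
    exact ⟨j, hj, by simp [hvj]⟩
  rw [hnil] at this
  exact absurd this (List.not_mem_nil)

-- the main equivalence
theorem ioptCalc_eq_alt (wN : Int) (rgwK : List Int) :
    ioptCalc wN rgwK = ioptCalc_alt wN rgwK := by
  simp only [ioptCalc, ioptCalc_alt]
  rw [loop_split, optFold_start wN _ (enumerate_fst_nonneg rgwK)]
  cases hF : (PySem.List.enumerate rgwK).filter (fun q => decide (q.2 > wN)) with
  | cons x F' =>
    -- some value exceeds wN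
    obtain ⟨hrp, hmem, hmin, k, hk1, hk2⟩ := bridge rgwK (fun v => decide (v > wN)) x F' hF
    set r := F'.foldl minStep x with hr
    have hgt : r.2 > wN := of_decide_eq_true hrp
    -- B's find? over the sorted values returns some v; show v = r.2
    cases hfind : (PySem.List.sorted rgwK (fun v => v) false).find? (fun v => decide (v > wN)) with
    | none =>
      exfalso
      have := List.find?_eq_none.mp hfind r.2 ((PySem.List.mem_sorted ..).mpr hmem)
      exact this hrp
    | some v =>
      obtain ⟨hpv, as, bs, hdec, has⟩ := List.find?_eq_some_iff_append.mp hfind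
      have hvgt : v > wN := of_decide_eq_true hpv
      have hvmem : v ∈ rgwK := (PySem.List.mem_sorted ..).mp (hdec ▸ List.mem_append_right _ (List.mem_cons_self ..))
      -- v ≤ r.2 : r.2 is in the sorted list, not among the non-matching prefix
      have hvle : v ≤ r.2 := by
        have hrs : r.2 ∈ as ++ v :: bs := hdec ▸ (PySem.List.mem_sorted ..).mpr hmem
        have hpw := PySem.List.sorted_pairwise rgwK (fun v => v)
        rw [hdec, List.pairwise_append] at hpw
        rcases List.mem_append.mp hrs with h1 | h2
        · exact absurd hrp (by simpa using has _ h1)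
        · rcases List.mem_cons.mp h2 with rfl | hbs
          · exact le_refl _
          · exact (List.pairwise_cons.mp hpw.2.1).1 _ hbs
      have hveq : v = r.2 := le_antisymm hvle (hmin v hvmem hpv)
      have hgtm1 : r.1 > -1 := by rw [hk1]; omega
      rw [if_pos hgtm1, hveq]
      simp only [hk2, Option.getD_some]
      exact hk1
  | nil =>
    -- no value exceeds wN: A returns imin, B the first index of the minimum
    have hnone : (PySem.List.sorted rgwK (fun v => v) false).find? (fun v => decide (v > wN)) = none := by
      rw [List.find?_eq_none]
      intro v hv hpv
      exact filter_ne_nil_of_mem rgwK (fun v => decide (v > wN)) v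
        ((PySem.List.mem_sorted ..).mp hv) hpv hF
    rw [hnone]
    simp only [if_neg (by omega : ¬ ((-1 : Int) > -1))]
    cases hrg : rgwK with
    | nil => simp [minFold, PySem.List.enumerate, (PySem.List.sorted_eq_nil_iff [] _ false).mpr rfl]
    | cons h t =>
      -- sorted is nonempty; its head m is the minimum value
      cases hs : PySem.List.sorted (h :: t) (fun v => v) false with
      | nil => exact absurd ((PySem.List.sorted_eq_nil_iff ..).mp hs) (by simp)
      | cons m srest =>
        have hmle : ∀ y ∈ (h :: t), m ≤ y := PySem.List.key_head_sorted_le _ _ hs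
        have hmmem : m ∈ (h :: t) := (PySem.List.mem_sorted ..).mp (hs ▸ List.mem_cons_self ..)
        -- A's imin fold as a running min over enumerate
        have hget : PySem.List.pyGet? (h :: t) (0 : Int) = some h := by
          simp
        rw [minFold_spec (h :: t) _ 0 h hget (enumerate_pyGet (h :: t))]
        have hcons : PySem.List.enumerate (h :: t) =
            (0, h) :: PySem.List.enumerate t 1 := PySem.List.enumerate_cons ..
        rw [hcons]
        simp only [List.foldl_cons, minStep, show ¬ (h < h) by omega]
        -- apply the bridge with the always-true predicate
        have hFt : (PySem.List.enumerate (h :: t)).filter (fun q => (fun _ : Int => true) q.2) =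
            ((0 : Int), h) :: PySem.List.enumerate t 1 := by
          rw [List.filter_true, hcons]
        obtain ⟨_, hmem, hmin, k, hk1, hk2⟩ := bridge (h :: t) (fun _ => true) (0, h)
          (PySem.List.enumerate t 1) hFt
        set r := (PySem.List.enumerate t 1).foldl minStep ((0 : Int), h) with hr
        have hmeq : m = r.2 := le_antisymm (hmle r.2 hmem) (hmin m hmmem rfl)
        simp only [hmeq, hk2, Option.getD_some]
        exact hk1

-- ===== VERDICT (by name: the statement is the Claim_ definition above) =====
theorem ioptCalc_spec : Claim_equal_ioptCalc := fun wN rgwK _ => ioptCalc_eq_alt wN rgwK
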